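-- pv_equiv track=rewrite | github.com/Pazbear/CodingTestStudy | 프로그래머스/LV2/[3차]n진수_게임.py | solution
-- ===== SOURCE A (Python) =====
-- def solution(n, t, m, p):
--     answer=""
--     str = "0"
--     i=1
--     cnt=0
--     while cnt < t:
--         str+=convert(n, i)
--         i+=1
--         while len(str)>m*cnt+(p-1):
--             answer+=str[m*cnt+(p-1)]
--             cnt+=1
--             if cnt>=t:
--                 break
--     return answer
--
-- def convert(n, num):
--     res = []
--     while num > 0:
--         num, mod = divmod(num, n)
--         mod = 'A' if mod == 10 else 'B' if mod ==11 else 'C' if mod==12 else 'D' if mod==13 else 'E' if mod==14 else 'F' if mod == 15 else mod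
--         res.append(str(mod))
--     return ''.join(res[::-1]) ## 리스트 역순
-- ===== SOURCE B (Python) =====
-- def solution(n, t, m, p):
--     # Directly compute each needed stream character by digit-count block
--     # arithmetic instead of generating the whole digit stream.
--     out = []
--     for k in range(t):
--         out.append(stream_char(n, p - 1 + m * k))
--     return ''.join(out)
--
-- def stream_char(n, q):
--     # character at position q of the stream "0" + base_n(1) + base_n(2) + ...
--     if q == 0:
--         return '0'
--     q -= 1  # position inside the concatenation of 1, 2, 3, ...
--     d = 1          # digit length of the current block of numbers
--     count = n - 1  # how many numbers have exactly d digits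
--     while q >= d * count:
--         q -= d * count
--         d += 1
--         count *= n
--     num = n ** (d - 1) + q // d   # the number the character belongs to
--     idx = q % d                   # which digit of num (most significant first)
--     digit = (num // n ** (d - 1 - idx)) % n
--     return "0123456789ABCDEF"[digit]
-- ===== Notes on version B (the rewrite author's own statement) =====
-- stated objective: faster
-- what changed: Instead of generating the whole digit stream number by number and picking every m-th character (A), B computes each of the t needed stream positions directly: it skips whole blocks of d-digit numbers with digit-count arithmetic, then extracts the digit with divmod/power formulas, never materialising the stream.
-- outside the precondition, e.g. on solution(18, 6, 3, 2): A returns '147AD1', B raises IndexError; on solution(3, 1, 1, 0): A returns '1', B returns '2'; on solution(2, 3, -4, 5): A returns '101', B returns '100'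
import Mathlib
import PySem

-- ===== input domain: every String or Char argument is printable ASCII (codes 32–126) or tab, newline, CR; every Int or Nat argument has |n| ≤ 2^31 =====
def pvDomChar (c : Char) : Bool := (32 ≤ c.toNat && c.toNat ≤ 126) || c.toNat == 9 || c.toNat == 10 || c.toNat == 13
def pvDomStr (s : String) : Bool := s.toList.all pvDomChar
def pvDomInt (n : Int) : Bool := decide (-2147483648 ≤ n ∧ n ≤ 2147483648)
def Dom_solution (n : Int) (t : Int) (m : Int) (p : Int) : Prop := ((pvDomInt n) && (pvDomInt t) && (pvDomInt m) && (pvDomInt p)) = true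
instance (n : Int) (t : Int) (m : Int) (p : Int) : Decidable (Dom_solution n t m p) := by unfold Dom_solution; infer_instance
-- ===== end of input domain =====

-- B replaces A's generate-the-whole-stream double loop by direct digit-count block
-- arithmetic computing each needed stream character on its own (objective: faster).

-- ===== PORT A =====
-- A's helper convert(n, num): while num > 0 collect digit strings, then join reversed.
-- Fuel num.toNat bounds the iteration count whenever n ≥ 2 (Python diverges/raises for n ≤ 1: outside Pre_).
def pvConvertLoop (n : Int) : Nat → Int → List String → List String
  | 0, _, res => res
  | fuel+1, num, res =>
    if num > 0 then
      match PySem.Int.divmod? num n with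
      | some qm =>
          let mod := qm.2
          let s := if mod == 10 then "A" else if mod == 11 then "B" else if mod == 12 then "C"
                   else if mod == 13 then "D" else if mod == 14 then "E" else if mod == 15 then "F"
                   else PySem.Int.toStr mod
          pvConvertLoop n fuel qm.1 (res ++ [s])
      | none => res          -- Python raises ZeroDivisionError (n = 0): outside Pre_
    else res

def pvConvert (n num : Int) : String :=
  PySem.Str.join "" (pvConvertLoop n num.toNat num []).reverse   -- ''.join(res[::-1])

-- A's inner while: pick str[m*cnt+(p-1)] while in range, break once cnt ≥ t.
-- cnt grows by 1 per iteration, so fuel (t-cnt).toNat+1 is never exhausted.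
def pvInner (t m p : Int) : Nat → String → Int → String → String × Int
  | 0, _, cnt, answer => (answer, cnt)
  | fuel+1, str, cnt, answer =>
    if PySem.Str.len str > m * cnt + (p - 1) then
      match PySem.Str.pyGet? str (m * cnt + (p - 1)) with
      | some c =>
          let answer' := answer.push c
          let cnt' := cnt + 1
          if cnt' ≥ t then (answer', cnt') else pvInner t m p fuel str cnt' answer'
      | none => (answer, cnt)   -- Python raises IndexError: outside Pre_
    else (answer, cnt)

-- A's outer while cnt < t: append convert(n, i), then run the inner while.
-- Each iteration appends ≥ 1 char inside Pre_, so fuel (m*t+p).toNat+1 is never exhausted there.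
def pvOuter (n t m p : Int) : Nat → String → Int → Int → String → String
  | 0, _, _, _, answer => answer
  | fuel+1, str, i, cnt, answer =>
    if cnt < t then
      let str2 := str ++ pvConvert n i
      let r := pvInner t m p ((t - cnt).toNat + 1) str2 cnt answer
      pvOuter n t m p fuel str2 (i + 1) r.2 r.1
    else answer

def solution (n : Int) (t : Int) (m : Int) (p : Int) : String :=
  pvOuter n t m p ((m * t + p).toNat + 1) "0" 1 0 ""

-- ===== PORT B =====
-- Source B's stream_char while loop: skip whole blocks of d-digit numbers.
-- q strictly decreases inside Pre_, so fuel q.toNat+1 is never exhausted there.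
def pvFindLoop (n : Int) : Nat → Int → Int → Int → Int × Int × Int
  | 0, q, d, count => (q, d, count)
  | fuel+1, q, d, count =>
    if q ≥ d * count then pvFindLoop n fuel (q - d * count) (d + 1) (count * n)
    else (q, d, count)

def pvStreamChar (n q : Int) : String :=
  if q == 0 then "0"
  else
    let q1 := q - 1
    let r := pvFindLoop n (q1.toNat + 1) q1 1 (n - 1)
    let q2 := r.1
    let d := r.2.1
    let num := n ^ (d - 1).toNat + PySem.Int.floordiv q2 d
    let idx := PySem.Int.mod q2 d
    let digit := PySem.Int.mod (PySem.Int.floordiv num (n ^ (d - 1 - idx).toNat)) n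
    match PySem.Str.pyGet? "0123456789ABCDEF" digit with
    | some c => String.ofList [c]
    | none => ""               -- Python raises IndexError (n > 16): outside Pre_

def solution_alt (n : Int) (t : Int) (m : Int) (p : Int) : String :=
  PySem.Str.join "" ((PySem.List.pyRange 0 t 1).map (fun k => pvStreamChar n (p - 1 + m * k)))

-- ===== PRECONDITION & SPEC =====
-- For t ≤ 0 both programs return "" whatever the other arguments are, so those inputs are
-- all admitted; for t > 0, Pre_ restricts to the problem's natural domain (the game is
-- stated for bases 2..16 and positive m, p): A raises or diverges for n ≤ 1; for n > 16
-- A's stream interleaves multi-character decimal chunks for digits above 15 and B may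
-- raise IndexError; for m < 0 or p ≤ 0 A reads via Python's accidental negative-index
-- wraparound (or raises IndexError).
def Pre_solution (n : Int) (t : Int) (m : Int) (p : Int) : Prop :=
  t ≤ 0 ∨ (2 ≤ n ∧ n ≤ 16 ∧ 0 ≤ m ∧ 1 ≤ p)
instance (n : Int) (t : Int) (m : Int) (p : Int) : Decidable (Pre_solution n t m p) := by
  unfold Pre_solution; infer_instance

def pvWitness_solution : Int × Int × Int × Int := (2, 4, 2, 1)

def Spec_solution (n : Int) (t : Int) (m : Int) (p : Int) (out : String) : Prop := out = solution_alt n t m p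
instance (n : Int) (t : Int) (m : Int) (p : Int) (out : String) : Decidable (Spec_solution n t m p out) := by
  unfold Spec_solution; infer_instance

-- ===== CLAIM (what is proved, stated in full; the proofs are below) =====
def Claim_equal_solution : Prop := ∀ (n : Int) (t : Int) (m : Int) (p : Int), Dom_solution n t m p → Pre_solution n t m p → Spec_solution n t m p (solution n t m p)

-- ===== LEMMAS AND PROOFS =====

-- the hexadecimal digit characters
def digitChar (d : Nat) : Char :=
  ['0','1','2','3','4','5','6','7','8','9','A','B','C','D','E','F'].getD d ' '
def digitStr (d : Nat) : String := String.ofList [digitChar d]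

-- the (most-significant-first) digits of i in base N
def chunk (N i : Nat) : List Nat := (Nat.digits N i).reverse
-- total number of stream characters contributed by the numbers 1..J
def SL (N J : Nat) : Nat := ((List.range' 1 J).map (fun i => (chunk N i).length)).sum
-- the digit stream "0" + base(1) + base(2) + ... + base(J), as digit values
def strDigs (N J : Nat) : List Nat := 0 :: (List.range' 1 J).flatMap (chunk N)
def strS (N J : Nat) : String := String.ofList ((strDigs N J).map digitChar)
-- total characters of the numbers with at most e digits (numbers 1..N^e-1)
def CUM (N : Nat) : Nat → Nat
  | 0 => 0
  | e+1 => CUM N e + (e+1) * (N^(e+1) - N^e)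

-- Nat model of Source B's block-skipping loop
def specFind (N : Nat) : Nat → Nat → Nat → Nat × Nat
  | 0, q, d => (q, d)
  | fuel+1, q, d =>
    if d * (N^d - N^(d-1)) ≤ q then specFind N fuel (q - d * (N^d - N^(d-1))) (d+1)
    else (q, d)

theorem SL_step (N j : Nat) : SL N (j+1) = SL N j + (chunk N (j+1)).length := by
  unfold SL
  rw [List.range'_concat]
  simp [Nat.add_comm]

theorem SL_ge (N j : Nat) (hN : 2 ≤ N) : j ≤ SL N j := by
  induction j with
  | zero => simp [SL]
  | succ k ih =>
    rw [SL_step]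
    have h1 : 1 ≤ (chunk N (k+1)).length := by
      have : Nat.digits N (k+1) ≠ [] := by
        rw [Nat.digits_ne_nil_iff_ne_zero]; omega
      simp [chunk]
      exact List.length_pos_iff.mpr this
    omega

theorem SL_mono (N : Nat) {a b : Nat} (h : a ≤ b) : SL N a ≤ SL N b := by
  induction b with
  | zero => simp at h; simp [h]
  | succ k ih =>
    rcases Nat.lt_or_ge a (k+1) with hlt | hge
    · have := ih (by omega)
      rw [SL_step]; omega
    · have : a = k+1 := by omega
      simp [this]

theorem length_strDigs (N J : Nat) : (strDigs N J).length = 1 + SL N J := by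
  simp [strDigs, SL, List.length_flatMap, Nat.add_comm]

theorem strDigs_prefix (N : Nat) {a b : Nat} (h : a ≤ b) : strDigs N a <+: strDigs N b := by
  unfold strDigs
  obtain ⟨k, rfl⟩ : ∃ k, b = a + k := ⟨b - a, by omega⟩
  refine ⟨(List.range' (1+a) k).flatMap (chunk N), ?_⟩
  rw [List.cons_append, ← List.flatMap_append, ← List.range'_append]
  simp

theorem strDigs_getD_eq (N : Nat) {a b q : Nat} (ha : q < (strDigs N a).length)
    (hb : q < (strDigs N b).length) :
    (strDigs N a).getD q 0 = (strDigs N b).getD q 0 := by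
  rcases Nat.le_total a b with hab | hab
  · have hpre := strDigs_prefix N hab
    rw [List.getD_eq_getElem _ _ ha, List.getD_eq_getElem _ _ hb]
    exact hpre.getElem ha
  · have hpre := strDigs_prefix N hab
    rw [List.getD_eq_getElem _ _ ha, List.getD_eq_getElem _ _ hb]
    exact (hpre.getElem hb).symm

theorem chunk_len (N i : Nat) (hN : 2 ≤ N) (hi : 1 ≤ i) :
    (chunk N i).length = Nat.log N i + 1 := by
  simp [chunk]
  rw [Nat.length_digits N i (by omega) (by omega)]

-- length of the digits of a number in the d-digit block
theorem chunk_len_block (N d i : Nat) (hN : 2 ≤ N) (hd : 1 ≤ d)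
    (h1 : N^(d-1) ≤ i) (h2 : i < N^d) : (chunk N i).length = d := by
  rw [chunk_len N i hN (by
      have : 1 ≤ N^(d-1) := Nat.one_le_pow _ _ (by omega)
      omega)]
  have hlog : Nat.log N i = d - 1 := by
    apply Nat.log_eq_of_pow_le_of_lt_pow h1
    have : d - 1 + 1 = d := by omega
    rw [this]; exact h2
  omega

-- SL inside the d-digit block, given its value at the block start
theorem SL_block_aux (N d : Nat) (hN : 2 ≤ N) (hd : 1 ≤ d)
    (hbase : SL N (N^(d-1) - 1) = CUM N (d-1)) :
    ∀ j, j ≤ N^d - N^(d-1) → SL N (N^(d-1) - 1 + j) = CUM N (d-1) + j * d := by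
  intro j
  induction j with
  | zero => simpa using hbase
  | succ k ih =>
    intro hk
    have hk' : k ≤ N^d - N^(d-1) := by omega
    have hpow : 1 ≤ N^(d-1) := Nat.one_le_pow _ _ (by omega)
    have hplt : N^(d-1) < N^d := by
      have : d - 1 < d := by omega
      exact Nat.pow_lt_pow_right (by omega) this
    have hstep : N^(d-1) - 1 + (k+1) = (N^(d-1) - 1 + k) + 1 := by omega
    rw [hstep, SL_step, ih hk']
    have hlen : (chunk N (N^(d-1) - 1 + k + 1)).length = d := by
      apply chunk_len_block N d _ hN hd (by omega) (by omega)
    rw [hlen]; ring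

theorem SL_pow (N : Nat) (hN : 2 ≤ N) : ∀ e, SL N (N^e - 1) = CUM N e := by
  intro e
  induction e with
  | zero => simp [SL, CUM]
  | succ k ih =>
    have hpow : 1 ≤ N^k := Nat.one_le_pow _ _ (by omega)
    have hplt : N^k < N^(k+1) := Nat.pow_lt_pow_right (by omega) (by omega)
    have h := SL_block_aux N (k+1) hN (by omega) (by simpa using ih) (N^(k+1) - N^k) (by simp)
    have harg : N^(k+1-1) - 1 + (N^(k+1) - N^k) = N^(k+1) - 1 := by
      simp only [Nat.add_sub_cancel]
      omega
    rw [harg] at h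
    rw [h]
    simp [CUM]
    ring

theorem SL_block (N d j : Nat) (hN : 2 ≤ N) (hd : 1 ≤ d) (hj : j ≤ N^d - N^(d-1)) :
    SL N (N^(d-1) - 1 + j) = CUM N (d-1) + j * d := by
  have := SL_block_aux N d hN hd (SL_pow N hN (d-1)) j hj
  exact this

-- the flatten-index lemma: position 1 + SL(num-1) + idx of the stream is digit idx of num
theorem strDigs_at (N J num idx : Nat) (h1 : 1 ≤ num) (hJ : num ≤ J)
    (hidx : idx < (chunk N num).length) :
    (strDigs N J).getD (1 + SL N (num-1) + idx) 0 = (chunk N num).getD idx 0 := by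
  unfold strDigs
  have hsplit : List.range' 1 J = List.range' 1 (num-1) ++ num :: List.range' (num+1) (J-num) := by
    have h1' := List.range'_append (s:=1) (m:=num-1) (n:=J-(num-1)) (step:=1)
    have hs : 1 + 1 * (num-1) = num := by omega
    have hmn : (num-1) + (J-(num-1)) = J := by omega
    rw [hs, hmn] at h1'
    rw [← h1']
    congr 1
    have h3 : J - (num - 1) = (J - num) + 1 := by omega
    rw [h3, List.range'_succ]
  rw [hsplit, List.flatMap_append, List.flatMap_cons]
  have hlen : ((List.range' 1 (num-1)).flatMap (chunk N)).length = SL N (num-1) := by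
    simp [List.length_flatMap, SL]
  have hidxf : 1 + SL N (num-1) + idx = (SL N (num-1) + idx) + 1 := by omega
  rw [hidxf, List.getD_cons_succ]
  rw [List.getD_append_right _ _ _ _ (by omega)]
  have h4 : SL N (num-1) + idx - ((List.range' 1 (num-1)).flatMap (chunk N)).length = idx := by
    omega
  rw [h4]
  exact List.getD_append _ _ _ _ hidx

theorem chunk_getD (N num idx : Nat) (hN : 2 ≤ N) (h1 : 1 ≤ num)
    (hidx : idx < (chunk N num).length) :
    (chunk N num).getD idx 0 = num / N ^ ((chunk N num).length - 1 - idx) % N := by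
  have hD : idx < (Nat.digits N num).length := by simpa [chunk] using hidx
  rw [List.getD_eq_getElem _ _ hidx]
  simp only [chunk, List.getElem_reverse]
  rw [← List.getD_eq_getElem _ 0]
  rw [Nat.getD_digits num _ hN]
  congr 2
  simp [chunk]

-- Source B's loop agrees with the Nat model
theorem pvFindLoop_eq_specFind (N : Nat) (hN : 2 ≤ N) :
    ∀ (fuel : Nat) (q d : Nat), 1 ≤ d →
    pvFindLoop (N : Int) fuel (q : Int) (d : Int) ((N^d - N^(d-1) : Nat) : Int) =
      (((specFind N fuel q d).1 : Int), ((specFind N fuel q d).2 : Int),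
       ((N^(specFind N fuel q d).2 - N^((specFind N fuel q d).2 - 1) : Nat) : Int)) := by
  intro fuel
  induction fuel with
  | zero => intro q d hd; simp [pvFindLoop, specFind]
  | succ f ih =>
    intro q d hd
    have hple : N^(d-1) ≤ N^d := Nat.pow_le_pow_right (by omega) (by omega)
    rw [pvFindLoop, specFind]
    by_cases hc : d * (N^d - N^(d-1)) ≤ q
    · have hcond : (q:Int) ≥ (d:Int) * ((N^d - N^(d-1) : Nat) : Int) := by
        exact_mod_cast hc
      rw [if_pos hcond, if_pos hc]
      have h1 : (q:Int) - (d:Int) * ((N^d - N^(d-1) : Nat) : Int) = ((q - d * (N^d - N^(d-1)) : Nat) : Int) := by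
        rw [Nat.cast_sub hc, Nat.cast_mul]
      have h2 : ((d:Int) + 1) = ((d+1 : Nat) : Int) := by push_cast; ring
      have h3 : ((N^d - N^(d-1) : Nat) : Int) * (N : Int) = ((N^(d+1) - N^((d+1)-1) : Nat) : Int) := by
        have : (N^d - N^(d-1)) * N = N^(d+1) - N^((d+1)-1) := by
          rw [Nat.sub_mul]
          have e1 : N^d * N = N^(d+1) := by rw [← pow_succ]
          have e2 : N^(d-1) * N = N^d := by
            rw [← pow_succ]
            congr 1
            omega
          simp [e1, e2]
        exact_mod_cast congrArg (Nat.cast : Nat → Int) this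
      rw [h1, h2, h3]
      have := ih (q - d * (N^d - N^(d-1))) (d+1) (by omega)
      have h4 : ((d+1:Nat) - 1) = d := by omega
      simpa [h4] using this
    · have hcond : ¬ ((q:Int) ≥ (d:Int) * ((N^d - N^(d-1) : Nat) : Int)) := by
        intro hco
        exact hc (by exact_mod_cast hco)
      rw [if_neg hcond, if_neg hc]

-- correctness of the Nat model
theorem specFind_spec (N : Nat) (hN : 2 ≤ N) :
    ∀ (fuel q d : Nat), 1 ≤ d → q < fuel →
    d ≤ (specFind N fuel q d).2 ∧
      q + CUM N (d-1) = (specFind N fuel q d).1 + CUM N ((specFind N fuel q d).2 - 1) ∧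
      1 ≤ (specFind N fuel q d).2 ∧
      (specFind N fuel q d).1 <
        (specFind N fuel q d).2 * (N^(specFind N fuel q d).2 - N^((specFind N fuel q d).2 - 1)) := by
  intro fuel
  induction fuel with
  | zero => intro q d hd hq; omega
  | succ f ih =>
    intro q d hd hq
    rw [specFind]
    by_cases hc : d * (N^d - N^(d-1)) ≤ q
    · simp only [if_pos hc]
      have hple : N^(d-1) < N^d := Nat.pow_lt_pow_right (by omega) (by omega)
      have hblk : 1 ≤ d * (N^d - N^(d-1)) := by
        have h1 : 1 ≤ N^d - N^(d-1) := by omega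
        calc 1 = 1 * 1 := by omega
        _ ≤ d * (N^d - N^(d-1)) := Nat.mul_le_mul hd h1
      have ihh := ih (q - d * (N^d - N^(d-1))) (d+1) (by omega) (by omega)
      refine ⟨by omega, ?_, by omega, ihh.2.2.2⟩
      have hcum : CUM N ((d+1)-1) = CUM N (d-1) + d * (N^d - N^(d-1)) := by
        have hd1 : (d+1) - 1 = (d-1) + 1 := by omega
        have hdd : (d-1) + 1 = d := by omega
        rw [hd1, CUM, hdd]
      have h2 := ihh.2.1
      rw [hcum] at h2
      omega
    · rw [if_neg hc]
      exact ⟨le_refl d, rfl, hd, by show q < d * (N^d - N^(d-1)); omega⟩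

-- the key B-side lemma: pvStreamChar reads the stream
theorem streamChar_eq (n : Int) (hn2 : 2 ≤ n) (hn16 : n ≤ 16) (q J : Nat)
    (hq : q < (strDigs n.toNat J).length) :
    pvStreamChar n (q : Int) = String.ofList [digitChar ((strDigs n.toNat J).getD q 0)] := by
  rcases Nat.eq_zero_or_pos q with hq0 | hq1
  · subst hq0
    rw [show (strDigs n.toNat J).getD 0 0 = 0 from rfl]
    simp only [pvStreamChar, Nat.cast_zero]
    norm_num
    decide
  · -- q = q0 + 1
    obtain ⟨q0, rfl⟩ : ∃ q0, q = q0 + 1 := ⟨q - 1, by omega⟩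
    have hN2 : 2 ≤ n.toNat := by omega
    have hN16 : n.toNat ≤ 16 := by omega
    have hn : n = (n.toNat : Int) := by omega
    set N := n.toNat with hNdef
    -- unfold the port
    have hne : (((q0+1 : Nat) : Int) == 0) = false := by
      simp
      omega
    rw [pvStreamChar, hne]
    simp only [Bool.false_eq_true, if_false]
    -- the loop arguments
    have hq1 : ((q0+1 : Nat) : Int) - 1 = ((q0 : Nat) : Int) := by push_cast; ring
    have htn : (((q0+1 : Nat) : Int) - 1).toNat = q0 := by omega
    have hloop := pvFindLoop_eq_specFind N hN2 (q0+1) q0 1 (le_refl 1)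
    simp only [Nat.cast_one] at hloop
    -- specFind data
    obtain ⟨hD1, hsum, hDpos, hr⟩ := specFind_spec N hN2 (q0+1) q0 1 (le_refl 1) (by omega)
    set r1 := (specFind N (q0+1) q0 1).1 with hr1def
    set D := (specFind N (q0+1) q0 1).2 with hDdef
    have hq0sum : q0 = r1 + CUM N (D-1) := by
      have hc0 : CUM N (1-1) = 0 := rfl
      omega
    have hcnt : (N : Int) - 1 = ((N^1 - N^(1-1) : Nat) : Int) := by
      have he : N^1 - N^(1-1) = N - 1 := by simp
      rw [he, Nat.cast_sub (by omega)]
      norm_num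
    -- rewrite the loop call
    rw [htn, hq1, hn, hcnt, hloop]
    dsimp only
    -- arithmetic on the extracted values
    have hplt : N^(D-1) < N^D := Nat.pow_lt_pow_right (by omega) (by omega)
    have hdiv : r1 / D < N^D - N^(D-1) := by
      rw [Nat.div_lt_iff_lt_mul (by omega)]
      calc r1 < D * (N^D - N^(D-1)) := hr
      _ = (N^D - N^(D-1)) * D := by ring
    set NUM := N^(D-1) + r1 / D with hNUMdef
    set IDX := r1 % D with hIDXdef
    have hIDXlt : IDX < D := Nat.mod_lt _ (by omega)
    have h1p : 1 ≤ N^(D-1) := Nat.one_le_pow _ _ (by omega)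
    have hNUMub : NUM < N^D := by
      rw [hNUMdef]
      omega
    have hNUM1 : 1 ≤ NUM := le_trans h1p (Nat.le_add_right _ _)
    -- cast computations
    have hdm1 : (((D:Nat):Int) - 1).toNat = D - 1 := by omega
    have hfd : PySem.Int.floordiv ((r1:Nat):Int) ((D:Nat):Int) = ((r1 / D : Nat) : Int) :=
      PySem.Int.floordiv_natCast r1 D
    have hmd : PySem.Int.mod ((r1:Nat):Int) ((D:Nat):Int) = ((IDX : Nat) : Int) :=
      PySem.Int.mod_natCast r1 D
    have hpow1 : ((N:Nat):Int) ^ (D-1) = ((N^(D-1) : Nat) : Int) := by push_cast; ring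
    have hnum : ((N:Nat):Int) ^ (((D:Nat):Int) - 1).toNat + PySem.Int.floordiv ((r1:Nat):Int) ((D:Nat):Int) = ((NUM : Nat) : Int) := by
      rw [hdm1, hfd, hpow1, hNUMdef]
      push_cast
      ring
    have hexp : (((D:Nat):Int) - 1 - ((IDX:Nat):Int)).toNat = D - 1 - IDX := by omega
    set DIG := NUM / N^(D-1-IDX) % N with hDIGdef
    have hdig : PySem.Int.mod (PySem.Int.floordiv ((NUM:Nat):Int) (((N:Nat):Int) ^ (D-1-IDX))) ((N:Nat):Int) = ((DIG : Nat) : Int) := by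
      have hp : ((N:Nat):Int) ^ (D-1-IDX) = ((N^(D-1-IDX) : Nat) : Int) := by push_cast; ring
      rw [hp, PySem.Int.floordiv_natCast, PySem.Int.mod_natCast, hDIGdef]
    have hDIGlt : DIG < 16 := by
      have hdn : DIG < N := Nat.mod_lt _ (by omega)
      omega
    rw [hmd, hexp, hnum, hdig]
    -- the table lookup
    have htab : PySem.Str.pyGet? "0123456789ABCDEF" ((DIG : Nat) : Int) = some (digitChar DIG) := by
      rw [PySem.Str.pyGet?_natCast]
      interval_cases DIG <;> decide
    rw [htab]
    -- now the right-hand side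
    have hSL : SL N (NUM - 1) = CUM N (D-1) + (r1 / D) * D := by
      have harg : NUM - 1 = N^(D-1) - 1 + r1 / D := by
        rw [hNUMdef]
        omega
      rw [harg]
      exact SL_block N D (r1/D) hN2 (by omega) (by omega)
    have hchlen : (chunk N NUM).length = D :=
      chunk_len_block N D NUM hN2 (by omega) (Nat.le_add_right _ _) hNUMub
    have hsplit : (r1 / D) * D + IDX = r1 := by
      have hdm := Nat.div_add_mod r1 D
      rw [Nat.mul_comm] at hdm
      rw [hIDXdef]
      omega
    have hNUMJ : NUM ≤ J := by
      by_contra hcon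
      have hmono : SL N J ≤ SL N (NUM - 1) := SL_mono N (by omega)
      have hqlt : q0 + 1 < (strDigs N J).length := hq
      rw [length_strDigs] at hqlt
      omega
    have hat := strDigs_at N J NUM IDX hNUM1 hNUMJ (by omega)
    have hqeq : q0 + 1 = 1 + SL N (NUM-1) + IDX := by
      omega
    rw [hqeq, hat]
    rw [chunk_getD N NUM IDX hN2 hNUM1 (by omega), hchlen]

-- A-side: convert computes the base-n chunk
theorem pvConvertLoop_eq (n : Int) (hn2 : 2 ≤ n) (hn16 : n ≤ 16) :
    ∀ (fuel x : Nat) (res : List String), x ≤ fuel →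
    pvConvertLoop n fuel (x : Int) res = res ++ (Nat.digits n.toNat x).map digitStr := by
  intro fuel
  induction fuel with
  | zero =>
    intro x res hx
    have : x = 0 := by omega
    subst this
    simp [pvConvertLoop]
  | succ f ih =>
    intro x res hx
    rcases Nat.eq_zero_or_pos x with h0 | h1
    · subst h0
      rw [pvConvertLoop]
      norm_num
    · rw [pvConvertLoop]
      have hpos : ((x:Nat):Int) > 0 := by exact_mod_cast h1
      rw [if_pos hpos]
      have hN0 : n ≠ 0 := by omega
      have hdm : PySem.Int.divmod? ((x:Nat):Int) n = some (((x / n.toNat : Nat) : Int), ((x % n.toNat : Nat) : Int)) := by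
        have hn : n = (n.toNat : Int) := by omega
        rw [hn]
        simp only [PySem.Int.divmod?]
        rw [if_neg (by omega)]
        rw [Int.fdiv_eq_ediv, Int.fmod_eq_emod, if_pos (by left; positivity), if_pos (by left; positivity)]
        push_cast
        simp
      rw [hdm]
      simp only []
      have hmlt : x % n.toNat < 16 := by
        have := Nat.mod_lt x (y := n.toNat) (by omega)
        omega
      have hch : (if (((x % n.toNat : Nat) : Int) == 10) = true then "A"
                  else if (((x % n.toNat : Nat) : Int) == 11) = true then "B"
                  else if (((x % n.toNat : Nat) : Int) == 12) = true then "C"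
                  else if (((x % n.toNat : Nat) : Int) == 13) = true then "D"
                  else if (((x % n.toNat : Nat) : Int) == 14) = true then "E"
                  else if (((x % n.toNat : Nat) : Int) == 15) = true then "F"
                  else PySem.Int.toStr ((x % n.toNat : Nat) : Int)) = digitStr (x % n.toNat) := by
        set v := x % n.toNat with hv
        clear_value v
        interval_cases v <;> decide
      rw [hch]
      rw [ih (x / n.toNat) (res ++ [digitStr (x % n.toNat)]) (by
        have : x / n.toNat < x := Nat.div_lt_self h1 (by omega)
        omega)]
      rw [Nat.digits_def' (b := n.toNat) (by omega) h1]
      simp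

theorem pvConvert_eq (n : Int) (hn2 : 2 ≤ n) (hn16 : n ≤ 16) (i : Nat) :
    pvConvert n (i : Int) = String.ofList ((chunk n.toNat i).map digitChar) := by
  unfold pvConvert
  have htn : ((i:Nat):Int).toNat = i := by omega
  rw [htn, pvConvertLoop_eq n hn2 hn16 i i [] (le_refl i)]
  simp only [List.nil_append]
  apply String.toList_inj.mp
  rw [PySem.Str.toList_join]
  have hmap : ((Nat.digits n.toNat i).map digitStr).reverse.map String.toList
      = ((chunk n.toNat i).map digitChar).map (fun c => [c]) := by
    simp [chunk, digitStr, List.map_reverse]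
  rw [hmap]
  have hsep : ("" : String).toList = [] := rfl
  rw [hsep, PySem.Chars.join_nil_singletons]
  simp

theorem strS_append (n : Int) (hn2 : 2 ≤ n) (hn16 : n ≤ 16) (j : Nat) :
    strS n.toNat j ++ pvConvert n ((j : Int) + 1) = strS n.toNat (j+1) := by
  have hcast : ((j:Nat):Int) + 1 = (((j+1 : Nat)):Int) := by push_cast; ring
  rw [hcast, pvConvert_eq n hn2 hn16 (j+1)]
  apply String.toList_inj.mp
  rw [String.toList_append]
  unfold strS
  simp only [String.toList_ofList]
  rw [← List.map_append]
  congr 1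
  unfold strDigs
  rw [List.range'_concat]
  simp [List.flatMap_append, Nat.add_comm]

-- the target string: the first c picked characters, read from the length-J0 stream
def picks (N J0 mp pp0 c : Nat) : String :=
  String.ofList ((List.range c).map (fun k => digitChar ((strDigs N J0).getD (pp0 + mp * k) 0)))

theorem picks_succ (N J0 mp pp0 c : Nat) :
    picks N J0 mp pp0 (c+1)
      = (picks N J0 mp pp0 c).push (digitChar ((strDigs N J0).getD (pp0 + mp * c) 0)) := by
  apply String.toList_inj.mp
  simp [picks, List.range_succ]

theorem len_strS (N j : Nat) : PySem.Str.len (strS N j) = ((strDigs N j).length : Int) := by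
  simp [strS, PySem.Str.len_eq]

theorem strS_get (N j q : Nat) (hq : q < (strDigs N j).length) :
    PySem.Str.pyGet? (strS N j) ((q : Nat) : Int)
      = some (digitChar ((strDigs N j).getD q 0)) := by
  rw [PySem.Str.pyGet?_natCast]
  simp only [strS, String.toList_ofList]
  rw [List.getElem?_map, List.getElem?_eq_getElem hq]
  rw [List.getD_eq_getElem _ _ hq]
  rfl

theorem join_singl (cs : List Char) :
    PySem.Str.join "" (cs.map (fun c => String.ofList [c])) = String.ofList cs := by
  apply String.toList_inj.mp
  rw [PySem.Str.toList_join]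
  have h1 : (cs.map (fun c => String.ofList [c])).map String.toList
      = cs.map (fun c => [c]) := by
    simp
  rw [h1]
  have h2 : ("" : String).toList = [] := rfl
  rw [h2, PySem.Chars.join_nil_singletons]
  simp

theorem inner_lemma (n t m p : Int) (N t' m' pp0 J0 : Nat)
    (hN2 : 2 ≤ N) (hN16 : N ≤ 16) (hn : n = (N : Int))
    (ht : t = (t' : Int)) (hm : m = (m' : Int)) (hp : p = (pp0 : Int) + 1)
    (hJ0 : J0 = pp0 + m' * t' + 1) :
    ∀ (fuel c j : Nat) (answer : String), c < t' → t' - c < fuel →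
      answer = picks N J0 m' pp0 c →
      ∃ c', pvInner t m p fuel (strS N j) (c : Int) answer = (picks N J0 m' pp0 c', (c' : Int)) ∧
        c ≤ c' ∧ c' ≤ t' ∧
        (c' < t' → ¬ (pp0 + m' * c' < (strDigs N j).length)) := by
  intro fuel
  induction fuel with
  | zero => intro c j answer hc hf hans; omega
  | succ f ih =>
    intro c j answer hc hf hans
    rw [pvInner]
    have hidx : m * (c : Int) + (p - 1) = ((pp0 + m' * c : Nat) : Int) := by
      subst hm hp; push_cast; ring
    have hlen := len_strS N j
    rw [hidx, hlen]
    by_cases hcond : pp0 + m' * c < (strDigs N j).length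
    · rw [if_pos (by exact_mod_cast hcond)]
      rw [strS_get N j _ hcond]
      dsimp only
      -- the picked character, read from the long stream
      have hclt : pp0 + m' * c < (strDigs N J0).length := by
        have hL := SL_ge N J0 hN2
        rw [length_strDigs]
        have hmul : m' * c ≤ m' * t' := Nat.mul_le_mul_left _ (by omega)
        omega
      have hchar : (strDigs N j).getD (pp0 + m' * c) 0
          = (strDigs N J0).getD (pp0 + m' * c) 0 := strDigs_getD_eq N hcond hclt
      have hpush : answer.push (digitChar ((strDigs N j).getD (pp0 + m' * c) 0))
          = picks N J0 m' pp0 (c+1) := by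
        rw [hans, hchar, picks_succ]
      have hc1 : (c : Int) + 1 = ((c+1 : Nat) : Int) := by push_cast; ring
      rw [hpush, hc1]
      by_cases hend : t' ≤ c + 1
      · rw [if_pos (by subst ht; exact_mod_cast hend)]
        exact ⟨c+1, rfl, by omega, by omega, fun hlt => absurd hlt (by omega)⟩
      · rw [if_neg (by subst ht; intro hco; exact hend (by exact_mod_cast hco))]
        obtain ⟨c', hres, h1, h2, h4⟩ := ih (c+1) j _ (by omega) (by omega) rfl
        exact ⟨c', hres, by omega, h2, h4⟩
    · rw [if_neg (by intro hco; exact hcond (by exact_mod_cast hco))]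
      exact ⟨c, by rw [hans], le_refl c, by omega, fun _ => hcond⟩

theorem outer_lemma (n t m p : Int) (N t' m' pp0 J0 : Nat)
    (hN2 : 2 ≤ N) (hN16 : N ≤ 16) (hn : n = (N : Int))
    (ht : t = (t' : Int)) (hm : m = (m' : Int)) (hp : p = (pp0 : Int) + 1)
    (hJ0 : J0 = pp0 + m' * t' + 1) (ht1 : 1 ≤ t') :
    ∀ (fuel j c : Nat) (answer : String),
      answer = picks N J0 m' pp0 c → c ≤ t' →
      (c < t' → (j = 0 ∨ ¬ (pp0 + m' * c < (strDigs N j).length))) →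
      pp0 + m' * (t' - 1) + 1 ≤ fuel + j →
      pvOuter n t m p fuel (strS N j) ((j : Int) + 1) (c : Int) answer
        = picks N J0 m' pp0 t' := by
  intro fuel
  induction fuel with
  | zero =>
    intro j c answer hans hc hfive hfuel
    rw [pvOuter]
    have hct : c = t' := by
      by_contra hne
      have hlt : c < t' := by omega
      rcases hfive hlt with hj0 | hnl
      · omega
      · rw [length_strDigs] at hnl
        have hL := SL_ge N j hN2
        have hmul : m' * c ≤ m' * (t'-1) := Nat.mul_le_mul_left _ (by omega)
        omega
    rw [hans, hct]
  | succ f ih =>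
    intro j c answer hans hc hfive hfuel
    rw [pvOuter]
    by_cases hlt : c < t'
    · rw [if_pos (by subst ht; exact_mod_cast hlt)]
      have hnt : n.toNat = N := by omega
      have hstr2 := strS_append n (by omega) (by omega) j
      rw [hnt] at hstr2
      rw [hstr2]
      have hif : (t - (c : Int)).toNat + 1 = (t' - c) + 1 := by subst ht; omega
      rw [hif]
      dsimp only
      obtain ⟨c', hres, hcc', hct', hfive'⟩ :=
        inner_lemma n t m p N t' m' pp0 J0 hN2 hN16 hn ht hm hp hJ0
          ((t' - c) + 1) c (j+1) answer hlt (by omega) hans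
      rw [hres]
      dsimp only
      have hj1 : ((j : Int) + 1) + 1 = (((j+1 : Nat)) : Int) + 1 := by push_cast; ring
      rw [hj1]
      exact ih (j+1) c' _ rfl hct' (fun hl => Or.inr (hfive' hl)) (by omega)
    · rw [if_neg (by subst ht; intro hco; exact hlt (by exact_mod_cast hco))]
      have hct : c = t' := by omega
      rw [hans, hct]

theorem strS_zero (N : Nat) : strS N 0 = "0" := by
  apply String.toList_inj.mp
  simp [strS, strDigs]
  decide

theorem main_equiv (n t m p : Int) (h : Pre_solution n t m p) :
    solution n t m p = solution_alt n t m p := by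
  by_cases ht0 : t ≤ 0
  · -- t ≤ 0: both sides are empty, whatever the other arguments are
    show pvOuter n t m p ((m * t + p).toNat + 1) "0" 1 0 "" = _
    rw [pvOuter, if_neg (by omega)]
    unfold solution_alt
    rw [PySem.List.pyRange_one_eq_nil (by omega)]
    rfl
  · obtain ⟨hn2, hn16, hm0, hp1⟩ : 2 ≤ n ∧ n ≤ 16 ∧ 0 ≤ m ∧ 1 ≤ p := by
      rcases h with h0 | hh
      · omega
      · exact hh
    have hn : n = (n.toNat : Int) := by omega
    set N := n.toNat with hNdef
    have hN2 : 2 ≤ N := by omega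
    have hN16 : N ≤ 16 := by omega
    have ht1 : 1 ≤ t := by omega
    set t' := t.toNat with ht'def
    set m' := m.toNat with hm'def
    set pp0 := (p - 1).toNat with hpp0def
    set J0 := pp0 + m' * t' + 1 with hJ0def
    have ht : t = (t' : Int) := by omega
    have hm : m = (m' : Int) := by omega
    have hp : p = (pp0 : Int) + 1 := by omega
    have htt1 : 1 ≤ t' := by omega
    have hmt : m * t = ((m' * t' : Nat) : Int) := by rw [hm, ht]; push_cast; ring
    -- A side
    have hA : solution n t m p = picks N J0 m' pp0 t' := by
      show pvOuter n t m p ((m * t + p).toNat + 1) "0" 1 0 "" = _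
      have h0s : ("0" : String) = strS N 0 := (strS_zero N).symm
      have h1c : (1 : Int) = ((0 : Nat) : Int) + 1 := by norm_num
      have h0c : (0 : Int) = ((0 : Nat) : Int) := by norm_num
      have hes : ("" : String) = picks N J0 m' pp0 0 := rfl
      rw [h0s, h1c, h0c, hes]
      apply outer_lemma n t m p N t' m' pp0 J0 hN2 hN16 hn ht hm hp hJ0def htt1
      · rfl
      · omega
      · intro _; exact Or.inl rfl
      · have htn : (m * t + p).toNat = m' * t' + pp0 + 1 := by omega
        have hmul : m' * (t' - 1) ≤ m' * t' := Nat.mul_le_mul_left _ (by omega)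
        omega
    -- B side
    have hB : solution_alt n t m p = picks N J0 m' pp0 t' := by
      unfold solution_alt
      rw [PySem.List.pyRange_one 0 t]
      have htt : (t - 0).toNat = t' := by omega
      rw [htt, List.map_map]
      have hmain : (List.range t').map ((fun k => pvStreamChar n (p - 1 + m * k)) ∘ (fun k : Nat => (0 : Int) + (k : Int)))
          = (List.range t').map (fun k => String.ofList [digitChar ((strDigs N J0).getD (pp0 + m' * k) 0)]) := by
        apply List.map_congr_left
        intro k hk
        have hklt : k < t' := List.mem_range.mp hk
        have hidx : p - 1 + m * ((0 : Int) + (k : Int)) = ((pp0 + m' * k : Nat) : Int) := by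
          rw [hm, hp]; push_cast; ring
        show pvStreamChar n (p - 1 + m * ((0 : Int) + (k : Int))) = _
        rw [hidx]
        have hq : pp0 + m' * k < (strDigs N J0).length := by
          rw [length_strDigs]
          have hL := SL_ge N J0 hN2
          have hmul : m' * k ≤ m' * t' := Nat.mul_le_mul_left _ (by omega)
          omega
        exact streamChar_eq n hn2 hn16 (pp0 + m' * k) J0 hq
      rw [hmain]
      have hmm : (List.range t').map (fun k => String.ofList [digitChar ((strDigs N J0).getD (pp0 + m' * k) 0)])
          = ((List.range t').map (fun k => digitChar ((strDigs N J0).getD (pp0 + m' * k) 0))).map (fun c => String.ofList [c]) := by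
        rw [List.map_map]
        rfl
      rw [hmm, join_singl]
      rfl
    rw [hA, hB]
-- ===== VERDICT (by name: the statement is the Claim_ definition above) =====
theorem solution_spec : Claim_equal_solution := by
  intro n t m p _ hpre
  unfold Spec_solution
  exact main_equiv n t m p hpre
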